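-- pv_equiv track=rewrite | github.com/jdpgrailsdev/advent_of_code_2021 | advent_of_code/puzzles/Puzzle03.py | __process_report
-- ===== SOURCE A (Python) =====
-- def __process_report(reports):
--     """Processes the diagnostic report"""
--     diagnostic = {}
--
--     for d in reports:
--         index = 0
--
--         while index < len(d):
--             value = d[index]
--             if len(value) > 0:
--                 bit = int(value)
--
--                 if index in diagnostic:
--                     diagnostic[index].append(bit)
--                 else:
--                     diagnostic[index] = [bit]
--
--             index += 1
--
--     return diagnostic
-- ===== SOURCE B (Python) =====
-- def __process_report(reports):
--     """Processes the diagnostic report (column-wise gathering instead of dict accumulation)"""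
--     order = []
--     for d in reports:
--         for i, v in enumerate(d):
--             if len(v) > 0 and i not in order:
--                 order.append(i)
--     return {i: [int(d[i]) for d in reports if i < len(d) and len(d[i]) > 0]
--             for i in order}
-- ===== Notes on version B (the rewrite author's own statement) =====
-- stated objective: alternative
-- what changed: Replaces the single-pass dict accumulation (append-or-create per cell) with a two-phase decomposition: one pass collects the first-occurrence order of non-empty column indices, then a per-key comprehension gathers each column's bits directly from the reports.
import Mathlib
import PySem

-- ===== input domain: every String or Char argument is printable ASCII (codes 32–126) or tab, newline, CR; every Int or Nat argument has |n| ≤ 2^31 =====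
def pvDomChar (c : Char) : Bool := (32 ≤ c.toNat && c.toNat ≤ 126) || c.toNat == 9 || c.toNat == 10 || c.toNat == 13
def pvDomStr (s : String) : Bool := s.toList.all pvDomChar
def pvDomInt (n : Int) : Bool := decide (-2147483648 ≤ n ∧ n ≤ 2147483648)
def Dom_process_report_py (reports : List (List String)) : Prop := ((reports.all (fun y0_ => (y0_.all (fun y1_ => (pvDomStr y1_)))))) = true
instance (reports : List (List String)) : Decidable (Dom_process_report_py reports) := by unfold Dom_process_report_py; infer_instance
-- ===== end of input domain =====

-- B replaces A's one-pass dict accumulation by a two-phase decomposition (collect the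
-- first-occurrence order of non-empty column indices, then gather each column directly);
-- alternative structure, not claimed faster.

-- ===== PORT A =====
-- the inner `while index < len(d)` loop: walks the row keeping the running index
def pvRowA (diagnostic : PySem.Dict Int (List Int)) (index : Int) (d : List String) :
    PySem.Dict Int (List Int) :=
  match d with
  | [] => diagnostic
  | value :: rest =>
      let diagnostic' :=
        if 0 < PySem.Str.len value then
          match PySem.Int.ofStr? value with   -- int(value); none = ValueError, excluded by Pre_
          | some bit =>
              if diagnostic.contains index then
                diagnostic.modify index [] (fun l => l ++ [bit])   -- diagnostic[index].append(bit)
              else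
                diagnostic.insert index [bit]                      -- diagnostic[index] = [bit]
          | none => diagnostic
        else diagnostic
      pvRowA diagnostic' (index + 1) rest

def process_report_py (reports : List (List String)) : List (Int × List Int) :=
  (reports.foldl (fun diagnostic d => pvRowA diagnostic 0 d) PySem.Dict.empty).items

-- ===== PORT B =====
-- first phase of Source B: first-occurrence order of the non-empty column indices
def pvOrderRow (order : List Int) (index : Int) (d : List String) : List Int :=
  match d with
  | [] => order
  | v :: rest =>
      pvOrderRow
        (if 0 < PySem.Str.len v ∧ index ∉ order then order ++ [index] else order)
        (index + 1) rest

-- [int(d[i]) for d in reports if i < len(d) and len(d[i]) > 0]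
def pvColumn (reports : List (List String)) (i : Int) : List Int :=
  (reports.filter
      (fun d => decide (i < (d.length : Int)) &&
                decide (0 < PySem.Str.len (PySem.List.pyGetD d i "")))).map
    (fun d => (PySem.Int.ofStr? (PySem.List.pyGetD d i "")).getD 0)

def process_report_py_alt (reports : List (List String)) : List (Int × List Int) :=
  (reports.foldl (fun order d => pvOrderRow order 0 d) []).map
    (fun i => (i, pvColumn reports i))

-- ===== PRECONDITION & SPEC =====
-- Pre_ excludes exactly the inputs on which Python's int(value) raises ValueError for some
-- non-empty cell (both A and Source B raise there).
def Pre_process_report_py (reports : List (List String)) : Prop :=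
  ∀ d ∈ reports, ∀ v ∈ d, 0 < PySem.Str.len v → (PySem.Int.ofStr? v).isSome = true
instance (reports : List (List String)) : Decidable (Pre_process_report_py reports) := by
  unfold Pre_process_report_py; infer_instance

def pvWitness_process_report_py : List (List String) := [["1", "0", ""], ["", "1"], ["0"]]

def Spec_process_report_py (reports : List (List String)) (out : List (Int × List Int)) : Prop :=
  out = process_report_py_alt reports
instance (reports : List (List String)) (out : List (Int × List Int)) :
    Decidable (Spec_process_report_py reports out) := by
  unfold Spec_process_report_py; infer_instance

-- ===== CLAIM (what is proved, stated in full; the proofs are below) =====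
def Claim_equal_process_report_py : Prop :=
  ∀ (reports : List (List String)), Dom_process_report_py reports →
    Pre_process_report_py reports →
    Spec_process_report_py reports (process_report_py reports)

-- ===== LEMMAS AND PROOFS =====

-- the (index, bit) cells of one row, in traversal order
def pvCellsRow (index : Int) (d : List String) : List (Int × Int) :=
  match d with
  | [] => []
  | v :: rest =>
      (if 0 < PySem.Str.len v then
         match PySem.Int.ofStr? v with
         | some b => [(index, b)]
         | none => []
       else []) ++ pvCellsRow (index + 1) rest

def pvCells (reports : List (List String)) : List (Int × Int) :=
  reports.flatMap (pvCellsRow 0)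

def pvStep (d : PySem.Dict Int (List Int)) (p : Int × Int) : PySem.Dict Int (List Int) :=
  d.modify p.1 [] (fun l => l ++ [p.2])

-- A's append-or-create branch is exactly `modify` with default []
lemma pvBranch_eq_modify (d : PySem.Dict Int (List Int)) (k : Int) (b : Int) :
    (if d.contains k then d.modify k [] (fun l => l ++ [b]) else d.insert k [b]) =
      d.modify k [] (fun l => l ++ [b]) := by
  by_cases h : d.contains k = true
  · simp [h]
  · simp [h, PySem.Dict.modify,
      PySem.Dict.getD_of_not_contains d ([] : List Int) (by simpa using h)]

lemma pvRowA_eq_foldl (d : List String) (diag : PySem.Dict Int (List Int)) (i : Int) :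
    pvRowA diag i d = (pvCellsRow i d).foldl pvStep diag := by
  induction d generalizing diag i with
  | nil => rfl
  | cons v rest ih =>
      simp only [pvRowA, pvCellsRow, List.foldl_append]
      by_cases hv : 0 < PySem.Str.len v
      · simp only [if_pos hv]
        cases hb : PySem.Int.ofStr? v with
        | none => simp only [hb, List.foldl_nil]; exact ih _ _
        | some b =>
            simp only [hb, List.foldl_cons, List.foldl_nil, pvStep]
            rw [ih, pvBranch_eq_modify]
      · simp only [if_neg hv, List.foldl_nil]; exact ih _ _

lemma pvA_normal (reports : List (List String)) :
    process_report_py reports = ((pvCells reports).foldl pvStep PySem.Dict.empty).items := by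
  simp only [process_report_py, pvCells, pvRowA_eq_foldl, List.foldl_flatMap]

lemma pvOrderRow_eq_update (d : List String) (order : List Int) (i : Int)
    (h : ∀ v ∈ d, 0 < PySem.Str.len v → (PySem.Int.ofStr? v).isSome = true) :
    pvOrderRow order i d = PySem.Set.update order ((pvCellsRow i d).map (·.1)) := by
  induction d generalizing order i with
  | nil => rfl
  | cons v rest ih =>
      have hrest : ∀ v ∈ rest, 0 < PySem.Str.len v → (PySem.Int.ofStr? v).isSome = true :=
        fun w hw => h w (List.mem_cons_of_mem _ hw)
      simp only [pvOrderRow, pvCellsRow, List.map_append, PySem.Set.update, List.foldl_append]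
      by_cases hv : 0 < PySem.Str.len v
      · have hne : v ≠ "" := by
          intro e; subst e; simp [PySem.Str.len] at hv
        cases hb : PySem.Int.ofStr? v with
        | none =>
            exfalso
            have := h v List.mem_cons_self hv
            simp [hb] at this
        | some b =>
            simp only [hb, if_pos hv, List.map_cons, List.map_nil, List.foldl_cons,
              List.foldl_nil]
            have harr : (if 0 < PySem.Str.len v ∧ i ∉ order then order ++ [i] else order) =
                PySem.Set.add order i := by
              by_cases hc : i ∈ order
              · simp [hv, hc, hne, PySem.Set.add]
              · simp [hv, hc, hne, PySem.Set.add]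
            rw [harr]
            simpa [PySem.Set.update] using ih (PySem.Set.add order i) (i + 1) hrest
      · have hv' : ¬ 0 < v.length := by simpa [PySem.Str.len_eq] using hv
        have harr : (if 0 < PySem.Str.len v ∧ i ∉ order then order ++ [i] else order) = order := by
          simp [hv']
        simp only [if_neg hv, harr, List.map_nil, List.foldl_nil]
        simpa [PySem.Set.update] using ih order (i + 1) hrest

lemma pvOrder_eq_ofList (reports : List (List String))
    (h : Pre_process_report_py reports) :
    reports.foldl (fun order d => pvOrderRow order 0 d) [] =
      PySem.Set.ofList ((pvCells reports).map (·.1)) := by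
  have : reports.foldl (fun order d => pvOrderRow order 0 d) [] =
      reports.foldl (fun order d => PySem.Set.update order ((pvCellsRow 0 d).map (·.1))) [] := by
    apply PySem.List.foldl_congr_mem
    intro acc d hd
    exact pvOrderRow_eq_update d acc 0 (fun v hv => h d hd v hv)
  rw [this]
  simp only [pvCells, PySem.Set.ofList, List.map_flatMap, PySem.Set.update, List.foldl_flatMap,
    PySem.Set.empty]

-- every key produced by a row starting at s is ≥ s
lemma pvCellsRow_keys_ge (d : List String) (s : Int) :
    ∀ p ∈ pvCellsRow s d, s ≤ p.1 := by
  induction d generalizing s with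
  | nil => simp [pvCellsRow]
  | cons v rest ih =>
      intro p hp
      simp only [pvCellsRow, List.mem_append] at hp
      rcases hp with hp | hp
      · by_cases hv : 0 < PySem.Str.len v
        · rw [if_pos hv] at hp
          cases hb : PySem.Int.ofStr? v with
          | none => simp only [hb] at hp; cases hp
          | some b => simp only [hb, List.mem_singleton] at hp; subst hp; exact le_rfl
        · rw [if_neg hv] at hp; cases hp
      · have := ih (s + 1) p hp; omega

lemma pyGetD_cons_of_pos {α : Type} (v : α) (rest : List α) (j : Int) (hj : 0 < j) (dflt : α) :
    PySem.List.pyGetD (v :: rest) j dflt = PySem.List.pyGetD rest (j - 1) dflt := by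
  simp only [PySem.List.pyGetD, PySem.List.pyGet?, PySem.List.pyIdx?, List.length_cons]
  rw [if_pos (by omega : (0:Int) ≤ j), if_pos (by omega : (0:Int) ≤ j - 1)]
  by_cases h2 : j - 1 < (rest.length : Int)
  · rw [if_pos (by push_cast; omega), if_pos h2]
    have hnat : j.toNat = (j - 1).toNat + 1 := by omega
    rw [hnat]
    simp only [Option.bind_some, List.getElem?_cons_succ]
  · rw [if_neg (by push_cast; omega), if_neg h2]
    rfl


lemma pyGetD_cons_zero {α : Type} (v : α) (rest : List α) (dflt : α) :
    PySem.List.pyGetD (v :: rest) 0 dflt = v := by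
  simp only [PySem.List.pyGetD, PySem.List.pyGet?, PySem.List.pyIdx?, List.length_cons]
  rw [if_pos le_rfl, if_pos (by push_cast; omega)]
  simp


-- one row's contribution to column i
lemma pvColumnRow (d : List String) (s i : Int) (hs : 0 ≤ s) (hsi : s ≤ i)
    (h : ∀ v ∈ d, 0 < PySem.Str.len v → (PySem.Int.ofStr? v).isSome = true) :
    ((pvCellsRow s d).filter (fun p => p.1 == i)).map (·.2) =
      if decide (i - s < (d.length : Int)) &&
         decide (0 < PySem.Str.len (PySem.List.pyGetD d (i - s) "")) then
        [(PySem.Int.ofStr? (PySem.List.pyGetD d (i - s) "")).getD 0]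
      else [] := by
  induction d generalizing s with
  | nil =>
      rw [if_neg (by simp; omega)]
      rfl
  | cons v rest ih =>
      simp only [pvCellsRow, List.filter_append, List.map_append]
      by_cases heq : i = s
      · subst heq
        have htail : (pvCellsRow (i + 1) rest).filter (fun p => p.1 == i) = [] := by
          apply List.filter_eq_nil_iff.mpr
          intro p hp
          have := pvCellsRow_keys_ge rest (i + 1) p hp
          simp only [beq_iff_eq]
          omega
        rw [htail]
        have hidx : i - i = (0 : Int) := by omega
        rw [hidx, pyGetD_cons_zero]
        by_cases hv : 0 < PySem.Str.len v
        · have hv' : 0 < v.length := by simpa [PySem.Str.len_eq] using hv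
          cases hb : PySem.Int.ofStr? v with
          | none =>
              have := h v List.mem_cons_self hv
              simp [hb] at this
          | some b =>
              rw [if_pos hv]
              simp only [hb]
              rw [if_pos (by simp [hv'])]
              simp
        · have hv' : ¬ 0 < v.length := by simpa [PySem.Str.len_eq] using hv
          have hv'' : v = "" := String.length_eq_zero_iff.mp (by omega)
          rw [if_neg hv, if_neg (by simp [hv''])]
          rfl
      · have hlt : s < i := lt_of_le_of_ne hsi (fun e => heq e.symm)
        have hhead : ((if 0 < PySem.Str.len v then
              match PySem.Int.ofStr? v with
              | some b => [(s, b)]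
              | none => []
            else []).filter (fun p => p.1 == i)) = [] := by
          apply List.filter_eq_nil_iff.mpr
          intro p hp
          by_cases hv : 0 < PySem.Str.len v
          · rw [if_pos hv] at hp
            cases hb : PySem.Int.ofStr? v with
            | none => simp only [hb] at hp; cases hp
            | some b =>
                simp only [hb, List.mem_singleton] at hp; subst hp
                simp only [beq_iff_eq]; omega
          · rw [if_neg hv] at hp; cases hp
        have hrec := ih (s + 1) (by omega) (by omega)
          (fun w hw => h w (List.mem_cons_of_mem _ hw))
        have hg : PySem.List.pyGetD (v :: rest) (i - s) "" =
            PySem.List.pyGetD rest (i - (s + 1)) "" := by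
          rw [pyGetD_cons_of_pos v rest (i - s) (by omega)]
          congr 1
          omega
        have hc : decide (i - s < ((v :: rest).length : Int)) =
            decide (i - (s + 1) < (rest.length : Int)) := by
          apply decide_eq_decide.mpr
          simp only [List.length_cons]
          push_cast
          omega
        rw [hhead]
        simp only [List.map_nil, List.nil_append]
        rw [hrec, hg, hc]


lemma pvColumn_eq_filter (reports : List (List String)) (i : Int) (hi : 0 ≤ i)
    (h : ∀ d ∈ reports, ∀ v ∈ d, 0 < PySem.Str.len v → (PySem.Int.ofStr? v).isSome = true) :
    pvColumn reports i = ((pvCells reports).filter (fun p => p.1 == i)).map (·.2) := by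
  induction reports with
  | nil => rfl
  | cons d r ih =>
      have hrow := pvColumnRow d 0 i le_rfl hi (fun v hv => h d List.mem_cons_self v hv)
      rw [sub_zero] at hrow
      have ihr := ih (fun d' hd' => h d' (List.mem_cons_of_mem _ hd'))
      have hcons : pvColumn (d :: r) i =
          (if decide (i < (d.length : Int)) &&
              decide (0 < PySem.Str.len (PySem.List.pyGetD d i "")) then
            [(PySem.Int.ofStr? (PySem.List.pyGetD d i "")).getD 0]
          else []) ++ pvColumn r i := by
        simp only [pvColumn, List.filter_cons]
        by_cases hP : (decide (i < (d.length : Int)) &&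
            decide (0 < PySem.Str.len (PySem.List.pyGetD d i ""))) = true
        · rw [if_pos hP, if_pos hP]; simp
        · rw [if_neg hP, if_neg hP]; simp
      rw [hcons, ihr]
      simp only [pvCells, List.flatMap_cons, List.filter_append, List.map_append]
      rw [hrow]

-- ===== VERDICT (by name: the statement is the Claim_ definition above) =====
theorem process_report_py_spec : Claim_equal_process_report_py := by
  intro reports _hdom hpre
  unfold Spec_process_report_py
  rw [pvA_normal, process_report_py_alt, pvOrder_eq_ofList reports hpre]
  have hnd : ((pvCells reports).foldl pvStep PySem.Dict.empty).keys.Nodup := by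
    simpa [pvStep] using
      PySem.Dict.nodup_keys_foldl_modify_key (pvCells reports) (fun p => p.1) ([] : List Int)
        (fun _ p l => l ++ [p.2]) PySem.Dict.empty (by simp)
  have hkeys : ((pvCells reports).foldl pvStep PySem.Dict.empty).keys =
      PySem.Set.ofList ((pvCells reports).map (·.1)) := by
    simpa [pvStep, PySem.Set.ofList, PySem.Set.update, PySem.Set.empty] using
      PySem.Dict.keys_foldl_modify_key (pvCells reports) (fun p => p.1) ([] : List Int)
        (fun _ p l => l ++ [p.2]) PySem.Dict.empty
  rw [PySem.Dict.items_eq_map_keys _ hnd ([] : List Int), hkeys]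
  apply List.map_congr_left
  intro k hk
  have hkmem : k ∈ (pvCells reports).map (·.1) := (PySem.Set.mem_ofList _ k).mp hk
  have hk0 : 0 ≤ k := by
    rcases List.mem_map.mp hkmem with ⟨p, hp, rfl⟩
    rcases List.mem_flatMap.mp hp with ⟨d, _, hpd⟩
    exact le_trans le_rfl (pvCellsRow_keys_ge d 0 p hpd)
  have hgetD : ((pvCells reports).foldl pvStep PySem.Dict.empty).getD k [] =
      ((pvCells reports).filter (fun p => p.1 == k)).map (·.2) := by
    simpa [pvStep] using
      PySem.Dict.getD_foldl_modify_append (pvCells reports) PySem.Dict.empty k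
  have hpre' : ∀ d ∈ reports, ∀ v ∈ d, 0 < PySem.Str.len v → (PySem.Int.ofStr? v).isSome = true := hpre
  rw [hgetD, pvColumn_eq_filter reports k hk0 hpre']
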